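-- pv_equiv track=rewrite | github.com/Aapng-cmd/my_polyctf_task | quest/quest_full2/src_web/cipher.py | hashing
-- ===== SOURCE A (Python) =====
-- import string
--
-- CHARACTERS = string.ascii_letters + string.digits
--
-- CHAR_LEN = len(CHARACTERS)
--
-- MODULUS = 60211648199136739340249792143800321623121589720382646739193941880491213844569703416040845966125697123
--
-- def sum_of_string(s):
--     return sum(map(ord, s))
--
-- def cycle_string(s):
--     start = ord(s[0])
--     for i in range(1, len(s)):
--         ord_val = ord(s[i])
--         if i % 5 == 0:
--             start += ord_val
--         elif i % 5 == 1:
--             start //= ord_val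
--         elif i % 5 == 2:
--             start -= ord_val
--         elif i % 5 == 3:
--             start *= ord_val
--         elif i % 5 == 4:
--             start = -pow(start, ord_val, MODULUS)
--     return start
--
-- def hashing(arr):
--     arr.append(arr[0])
--     HASH = []
--     prev_cycle = cycle_string(arr[0])
--     for i in range(1, len(arr)):
--         current_cycle = cycle_string(arr[i])
--         if current_cycle < prev_cycle:
--             index = pow(sum_of_string("".join(arr[i:])), abs(sum_of_string(arr[i - 1]) << sum_of_string(arr[i])), CHAR_LEN)
--         else:
--             index = pow(sum_of_string("".join(arr[:i + 1])), abs(sum_of_string(arr[i - 1]) << sum_of_string(arr[i])), CHAR_LEN)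
--         HASH.append(CHARACTERS[index % CHAR_LEN])
--     prev_cycle = current_cycle
--     return ''.join(HASH)
-- ===== SOURCE B (Python) =====
-- import string
--
-- CHARACTERS = string.ascii_letters + string.digits
--
-- CHAR_LEN = len(CHARACTERS)
--
-- MODULUS = 60211648199136739340249792143800321623121589720382646739193941880491213844569703416040845966125697123
--
--
-- def _cycle(s):
--     it = iter(s)
--     start = ord(next(it))
--     for i, ch in enumerate(it, 1):
--         o = ord(ch)
--         r = i % 5
--         if r == 0:
--             start += o
--         elif r == 1:
--             start //= o
--         elif r == 2:
--             start -= o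
--         elif r == 3:
--             start *= o
--         else:
--             start = -pow(start, o, MODULUS)
--     return start
--
--
-- def hashing(arr):
--     # Does NOT mutate arr (the original appends arr[0] to the caller's list).
--     # Same string: every comparison in the original is against cycle_string(arr[0])
--     # (its prev_cycle update sits outside the loop), and each slice-join ord-sum
--     # is read off a prefix-sum table instead of re-joining the slice.
--     ext = arr + [arr[0]]
--     sums = [sum(map(ord, s)) for s in ext]
--     prefs = [0]
--     pref = 0
--     for v in sums:
--         pref += v
--         prefs.append(pref)
--     total = pref
--     pivot = _cycle(ext[0])
--     out = []
--     for i in range(1, len(ext)):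
--         base = total - prefs[i] if _cycle(ext[i]) < pivot else prefs[i + 1]
--         out.append(CHARACTERS[pow(base, sums[i - 1] << sums[i], CHAR_LEN) % CHAR_LEN])
--     return ''.join(out)
-- ===== Notes on version B (the rewrite author's own statement) =====
-- stated objective: faster
-- what changed: Each iteration's ord-sum of a joined slice arr[i:] / arr[:i+1] is read off a prefix-sum table built in one pass, instead of re-joining the slice and re-summing it; the comparison pivot cycle_string(arr[0]) (the original's prev_cycle is never updated inside the loop) is computed once; B does not mutate the caller's list.
import Mathlib
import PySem

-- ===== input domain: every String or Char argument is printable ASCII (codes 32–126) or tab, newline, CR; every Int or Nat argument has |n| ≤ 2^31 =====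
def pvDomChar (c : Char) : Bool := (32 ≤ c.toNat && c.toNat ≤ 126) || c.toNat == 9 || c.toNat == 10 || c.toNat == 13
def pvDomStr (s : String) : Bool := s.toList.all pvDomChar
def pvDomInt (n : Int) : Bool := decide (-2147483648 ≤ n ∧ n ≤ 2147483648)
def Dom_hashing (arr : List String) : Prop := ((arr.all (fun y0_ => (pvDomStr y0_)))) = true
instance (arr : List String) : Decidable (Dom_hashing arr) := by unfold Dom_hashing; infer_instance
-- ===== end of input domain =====

-- B replaces the per-iteration slice-join + re-sum with a prefix-sum table (faster); return-value
-- equivalence only: the Python A appends arr[0] to the caller's list, B does not mutate it.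

-- ===== PORT A =====

def pvMODULUS : Int := 60211648199136739340249792143800321623121589720382646739193941880491213844569703416040845966125697123

-- string.ascii_letters + string.digits
def pvCHARACTERS : List Char := "abcdefghijklmnopqrstuvwxyzABCDEFGHIJKLMNOPQRSTUVWXYZ0123456789".toList

-- sum(map(ord, s)) on the character list / on a string
def sumChars (l : List Char) : Int := (l.map (fun c => (c.toNat : Int))).sum
def sumOfString (s : String) : Int := sumChars s.toList

-- Python's three-argument pow(b, e, m) for m > 0: binary modular exponentiation of (b mod m) —
-- the same value as PySem.Int.powMod b e m, but evaluable for the huge exponents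
-- (ord-sum << ord-sum) this program feeds it.
def natPowMod (b e m : Nat) : Nat :=
  if h : e = 0 then 1 % m
  else
    let r := natPowMod (b * b % m) (e / 2) m
    if e % 2 = 1 then b * r % m else r
  termination_by e
  decreasing_by exact Nat.div_lt_self (Nat.pos_of_ne_zero h) (by omega)

def pyPowMod (b : Int) (e : Nat) (m : Int) : Int :=
  Int.ofNat (natPowMod (PySem.Int.mod b m).toNat e m.toNat)

-- one step of cycle_string's loop body (branch order as in the Python)
def cycleStep (st : Int) (i : Nat) (o : Int) : Int :=
  if i % 5 = 0 then st + o
  else if i % 5 = 1 then PySem.Int.floordiv st o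
  else if i % 5 = 2 then st - o
  else if i % 5 = 3 then st * o
  else -(pyPowMod st o.toNat pvMODULUS)

-- cycle_string(s); on "" Python raises IndexError (s[0]) — excluded by Pre_, arbitrary 0 here
def cycleString (s : String) : Int :=
  match s.toList with
  | [] => 0
  | c :: rest =>
    (PySem.List.enumerate rest 1).foldl
      (fun st p => cycleStep st p.1.toNat ((p.2.toNat : Int))) ((c.toNat : Int))

def hashing (arr : List String) : String :=
  match arr with
  | [] => ""  -- Python raises IndexError (arr[0]); excluded by Pre_
  | a0 :: tl =>
    let arr2 := (a0 :: tl) ++ [a0]              -- arr.append(arr[0])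
    let prev := cycleString (PySem.List.pyGetD arr2 0 "")  -- prev_cycle; never reassigned inside the loop
    let step := fun (hsh : List Char) (i : Int) =>
      let cur := cycleString (PySem.List.pyGetD arr2 i "")
      -- abs(sum_of_string(arr[i-1]) << sum_of_string(arr[i])); Python '<< y' (y ≥ 0 here) is '<<< y.toNat'
      let e := ((sumOfString (PySem.List.pyGetD arr2 (i - 1) "")) <<<
                  (sumOfString (PySem.List.pyGetD arr2 i "")).toNat).natAbs
      let base := if cur < prev
        then sumOfString (PySem.Str.join "" (PySem.List.slice arr2 (some i) none))
        else sumOfString (PySem.Str.join "" (PySem.List.slice arr2 none (some (i + 1))))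
      let idx := pyPowMod base e 62
      hsh ++ [PySem.List.pyGetD pvCHARACTERS (PySem.Int.mod idx 62) ' ']
    String.ofList ((PySem.List.pyRange 1 (arr2.length : Int) 1).foldl step [])

-- ===== PORT B =====

-- _cycle(s): same cycle computation, written over enumerate(iter, 1) as in Source B
def cycleAlt (s : String) : Int :=
  match s.toList with
  | [] => 0
  | c :: rest =>
    (PySem.List.enumerate rest 1).foldl
      (fun st p => cycleStep st p.1.toNat ((p.2.toNat : Int))) ((c.toNat : Int))

def hashing_alt (arr : List String) : String :=
  match arr with
  | [] => ""
  | a0 :: tl =>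
    let ext := (a0 :: tl) ++ [a0]
    let sums := ext.map sumOfString
    -- prefs = [0]; pref = 0; for v in sums: pref += v; prefs.append(pref)
    let scan := sums.foldl (fun (st : List Int × Int) v => (st.1 ++ [st.2 + v], st.2 + v)) ([0], 0)
    let prefs := scan.1
    let total := scan.2
    let pivot := cycleAlt (PySem.List.pyGetD ext 0 "")
    let step := fun (out : List Char) (i : Int) =>
      let base := if cycleAlt (PySem.List.pyGetD ext i "") < pivot
        then total - PySem.List.pyGetD prefs i 0
        else PySem.List.pyGetD prefs (i + 1) 0
      let e := ((PySem.List.pyGetD sums (i - 1) 0) <<< (PySem.List.pyGetD sums i 0).toNat).toNat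
      out ++ [PySem.List.pyGetD pvCHARACTERS (PySem.Int.mod (pyPowMod base e 62) 62) ' ']
    String.ofList ((PySem.List.pyRange 1 (ext.length : Int) 1).foldl step [])

-- ===== PRECONDITION & SPEC =====

-- Pre_ excludes exactly the inputs on which the Python A raises IndexError: the empty list
-- (arr[0]) and any list containing an empty string (cycle_string's s[0]).
def Pre_hashing (arr : List String) : Prop := arr ≠ [] ∧ ∀ s ∈ arr, s ≠ ""
instance (arr : List String) : Decidable (Pre_hashing arr) := by unfold Pre_hashing; infer_instance

def pvWitness_hashing : List String := ["ab", "c"]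

def Spec_hashing (arr : List String) (out : String) : Prop := out = hashing_alt arr
instance (arr : List String) (out : String) : Decidable (Spec_hashing arr out) := by
  unfold Spec_hashing; infer_instance

-- ===== CLAIM (what is proved, stated in full; the proofs are below) =====
def Claim_equal_hashing : Prop :=
  ∀ (arr : List String), Dom_hashing arr → Pre_hashing arr → Spec_hashing arr (hashing arr)

-- ===== LEMMAS AND PROOFS =====

-- the per-index element A's loop appends (prev_cycle is the constant cycle of ext[0])
def fA (ext : List String) (i : Int) : Char :=
  let cur := cycleString (PySem.List.pyGetD ext i "")
  let e := ((sumOfString (PySem.List.pyGetD ext (i - 1) "")) <<<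
              (sumOfString (PySem.List.pyGetD ext i "")).toNat).natAbs
  let base := if cur < cycleString (PySem.List.pyGetD ext 0 "")
    then sumOfString (PySem.Str.join "" (PySem.List.slice ext (some i) none))
    else sumOfString (PySem.Str.join "" (PySem.List.slice ext none (some (i + 1))))
  PySem.List.pyGetD pvCHARACTERS (PySem.Int.mod (pyPowMod base e 62) 62) ' '

-- the per-index element B's loop appends
def fB (ext : List String) (i : Int) : Char :=
  let sums := ext.map sumOfString
  let scan := sums.foldl (fun (st : List Int × Int) v => (st.1 ++ [st.2 + v], st.2 + v)) ([0], 0)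
  let base := if cycleAlt (PySem.List.pyGetD ext i "") < cycleAlt (PySem.List.pyGetD ext 0 "")
    then scan.2 - PySem.List.pyGetD scan.1 i 0
    else PySem.List.pyGetD scan.1 (i + 1) 0
  let e := ((PySem.List.pyGetD sums (i - 1) 0) <<< (PySem.List.pyGetD sums i 0).toNat).toNat
  PySem.List.pyGetD pvCHARACTERS (PySem.Int.mod (pyPowMod base e 62) 62) ' '

theorem cycleAlt_eq (s : String) : cycleAlt s = cycleString s := rfl

theorem hashing_cons (a0 : String) (tl : List String) :
    hashing (a0 :: tl) =
      String.ofList ((PySem.List.pyRange 1 ((((a0 :: tl) ++ [a0]).length : Nat) : Int) 1).foldl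
        (fun hsh i => hsh ++ [fA ((a0 :: tl) ++ [a0]) i]) []) := rfl

theorem hashing_alt_cons (a0 : String) (tl : List String) :
    hashing_alt (a0 :: tl) =
      String.ofList ((PySem.List.pyRange 1 ((((a0 :: tl) ++ [a0]).length : Nat) : Int) 1).foldl
        (fun out i => out ++ [fB ((a0 :: tl) ++ [a0]) i]) []) := rfl

theorem sumChars_nonneg (l : List Char) : 0 ≤ sumChars l := by
  unfold sumChars
  apply List.sum_nonneg
  intro x hx
  obtain ⟨c, _, rfl⟩ := List.mem_map.mp hx
  positivity

theorem sumOfString_nonneg (s : String) : 0 ≤ sumOfString s := sumChars_nonneg _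

theorem flatten_intersperse_nil {α : Type} (ll : List (List α)) :
    (List.intersperse [] ll).flatten = ll.flatten := by
  induction ll with
  | nil => rfl
  | cons a t ih =>
    cases t with
    | nil => rfl
    | cons b t2 =>
      have h : List.intersperse ([] : List α) (a :: b :: t2)
          = a :: [] :: List.intersperse [] (b :: t2) := by simp [List.intersperse]
      rw [h]
      simp only [List.flatten_cons, List.nil_append] at *
      rw [ih]

-- sum_of_string("".join(parts)) is the sum of the per-string sums
theorem sum_join (parts : List String) :
    sumOfString (PySem.Str.join "" parts) = (parts.map sumOfString).sum := by
  show sumChars (PySem.Str.join "" parts).toList = _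
  rw [PySem.Str.toList_join]
  show sumChars (List.intercalate [] (parts.map String.toList)) = _
  rw [List.intercalate, flatten_intersperse_nil]
  induction parts with
  | nil => rfl
  | cons p ps ih =>
    simp only [List.map_cons, List.flatten_cons, List.sum_cons, ← ih]
    unfold sumChars
    rw [List.map_append, List.sum_append]
    rfl

-- the prefix-sum scan of Source B, characterised
theorem scan_spec (l : List Int) : ∀ (acc : List Int) (p : Int),
    l.foldl (fun (st : List Int × Int) v => (st.1 ++ [st.2 + v], st.2 + v)) (acc, p)
      = (acc ++ (List.range l.length).map (fun j => p + (l.take (j + 1)).sum), p + l.sum) := by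
  induction l with
  | nil => intro acc p; simp
  | cons v vs ih =>
    intro acc p
    simp only [List.foldl_cons, ih (acc ++ [p + v]) (p + v), List.length_cons,
      List.range_succ_eq_map, List.map_cons, List.map_map, Prod.mk.injEq]
    refine ⟨?_, by simp; ring⟩
    rw [List.append_assoc, List.singleton_append]
    congr 1
    all_goals try simp
    all_goals (intro a _; ring)

theorem fA_eq_fB (ext : List String) (i : Int) (h1 : 1 ≤ i) (h2 : i < (ext.length : Int)) :
    fA ext i = fB ext i := by
  lift i to Nat using (by omega : (0:Int) ≤ i) with k
  have hk1 : 1 ≤ k := by exact_mod_cast h1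
  have hk2 : k < ext.length := by exact_mod_cast h2
  simp only [fA, fB, cycleAlt_eq]
  rw [show ((k:Int) - 1) = ((k-1 : Nat) : Int) by omega,
      show ((k:Int) + 1) = ((k+1 : Nat) : Int) by push_cast; ring,
      PySem.List.slice_from_natCast, PySem.List.slice_to_natCast]
  have hsum : ∀ (j : Nat), PySem.List.pyGetD (ext.map sumOfString) (j:Int) 0
      = sumOfString (PySem.List.pyGetD ext (j:Int) "") := by
    intro j
    rw [show (0:Int) = sumOfString "" from rfl, PySem.List.pyGetD_map]
  rw [hsum, hsum, scan_spec]
  simp only []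
  have hpre : ∀ (j : Nat), 1 ≤ j → j ≤ ext.length →
      PySem.List.pyGetD ([0] ++ (List.range (ext.map sumOfString).length).map
        (fun t => 0 + ((ext.map sumOfString).take (t + 1)).sum)) (j:Int) 0
      = 0 + ((ext.map sumOfString).take j).sum := by
    intro j hj1 hj2
    rw [PySem.List.pyGetD_natCast]
    obtain ⟨t, rfl⟩ : ∃ t, j = t + 1 := ⟨j - 1, by omega⟩
    rw [List.singleton_append, List.getD_cons_succ,
        PySem.List.getD_map_range _ _ _ _ (by simpa using (by omega : t < ext.length))]
  rw [hpre k hk1 (by omega), hpre (k+1) (by omega) (by omega)]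
  have hshift : ∀ (x y : Int), 0 ≤ x → (x <<< y.toNat).natAbs = (x <<< y.toNat).toNat := by
    intro x y hx
    rw [Int.shiftLeft_eq]
    have : 0 ≤ x * 2 ^ y.toNat := by positivity
    omega
  rw [hshift _ _ (sumOfString_nonneg _)]
  have hdrop : sumOfString (PySem.Str.join "" (List.drop k ext))
      = 0 + (ext.map sumOfString).sum - (0 + ((ext.map sumOfString).take k).sum) := by
    rw [sum_join, List.map_drop]
    have := List.sum_take_add_sum_drop (ext.map sumOfString) k
    omega
  have htake : sumOfString (PySem.Str.join "" (List.take (k + 1) ext))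
      = 0 + ((ext.map sumOfString).take (k + 1)).sum := by
    rw [sum_join, List.map_take]
    omega
  rw [hdrop, htake]

theorem hashing_eq_alt (arr : List String) : hashing arr = hashing_alt arr := by
  cases arr with
  | nil => rfl
  | cons a0 tl =>
    rw [hashing_cons, hashing_alt_cons,
      PySem.List.foldl_append_singleton_eq_map, PySem.List.foldl_append_singleton_eq_map]
    apply congrArg String.ofList
    apply List.map_congr_left
    intro i hi
    rw [PySem.List.mem_pyRange_one] at hi
    exact fA_eq_fB _ i hi.1 hi.2

-- ===== VERDICT (by name: the statement is the Claim_ definition above) =====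
theorem hashing_spec : Claim_equal_hashing := by
  intro arr _ _
  show hashing arr = hashing_alt arr
  exact hashing_eq_alt arr
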